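-- pv_equiv track=rewrite | github.com/nayavu/air-conditioner-controller | tools/analyzer.py | make_square_signal
-- ===== SOURCE A (Python) =====
-- def make_square_signal(row):
--     x = []
--     y = []
--     i = 0
--     t = 0 # timings in row are relative, to display them correctly we need absolute values
--     for p in row:
--         x.append(t + p)
--         t += p
--         y.append(i)
--         i = 0 if i == 1 else 1
--     return x, y
-- ===== SOURCE B (Python) =====
-- def make_square_signal(row):
--     # x built back-to-front: start from the grand total and walk the row in
--     # reverse, subtracting each step; y produced by tiling a two-element zero-one pattern and slicing.
--     n = len(row)
--     t = sum(row)
--     x = []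
--     for p in reversed(row):
--         x.append(t)
--         t -= p
--     x.reverse()
--     y = ([0, 1] * ((n + 1) // 2))[:n]
--     return x, y
-- ===== Notes on version B (the rewrite author's own statement) =====
-- stated objective: alternative
-- what changed: x is built back-to-front from the precomputed grand total by subtracting elements along a reverse traversal (suffix-difference instead of running prefix sum), and y is produced by tiling a two-element zero-one pattern and slicing, instead of A's single forward loop threading a running total and a toggled flag.
import Mathlib
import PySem

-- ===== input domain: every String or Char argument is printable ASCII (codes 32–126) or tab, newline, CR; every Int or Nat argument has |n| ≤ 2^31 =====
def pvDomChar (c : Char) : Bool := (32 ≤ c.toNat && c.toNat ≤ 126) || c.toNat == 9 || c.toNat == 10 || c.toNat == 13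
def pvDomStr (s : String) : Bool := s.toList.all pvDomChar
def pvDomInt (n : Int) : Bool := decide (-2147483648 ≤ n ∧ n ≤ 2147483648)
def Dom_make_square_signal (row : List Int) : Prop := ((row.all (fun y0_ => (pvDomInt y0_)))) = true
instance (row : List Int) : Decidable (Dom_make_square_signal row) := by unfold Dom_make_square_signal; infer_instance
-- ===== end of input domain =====

-- B builds x back-to-front from the precomputed grand total along a reverse traversal
-- (suffix differences), and y by tiling [0,1] and slicing — instead of A's single
-- forward loop threading a running total and a toggled flag; objective: alternative.

-- ===== PORT A =====
-- state: (x, y, i, t); loop body appends t+p to x, i to y, toggles i, sets t := t+p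
def make_square_signal (row : List Int) : List Int × List Int :=
  let s := row.foldl
    (fun (s : List Int × List Int × Int × Int) p =>
      (s.1 ++ [s.2.2.2 + p], s.2.1 ++ [s.2.2.1],
       (if s.2.2.1 = 1 then 0 else 1), s.2.2.2 + p))
    ([], [], 0, 0)
  (s.1, s.2.1)

-- ===== PORT B =====
-- reverse loop: append current t, then t -= p; state (x, t)
def make_square_signal_alt (row : List Int) : List Int × List Int :=
  let n := row.length
  let s := row.reverse.foldl
    (fun (s : List Int × Int) p => (s.1 ++ [s.2], s.2 - p))
    ([], row.sum)
  let x := s.1.reverse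
  let y := ((List.replicate ((n + 1) / 2) ([0, 1] : List Int)).flatten).take n
  (x, y)

-- ===== PRECONDITION & SPEC =====
def Spec_make_square_signal (row : List Int) (out : List Int × List Int) : Prop := out = make_square_signal_alt row
instance (row : List Int) (out : List Int × List Int) : Decidable (Spec_make_square_signal row out) := by unfold Spec_make_square_signal; infer_instance

-- ===== CLAIM (what is proved, stated in full; the proofs are below) =====
def Claim_equal_make_square_signal : Prop := ∀ (row : List Int), Dom_make_square_signal row → Spec_make_square_signal row (make_square_signal row)

-- ===== LEMMAS AND PROOFS =====

-- the prefix sums starting from t (the x-list A's loop produces)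
def pvAccum (t : Int) : List Int → List Int
  | [] => []
  | p :: rest => (t + p) :: pvAccum (t + p) rest

-- the alternating list A's y-loop produces from toggle state i, for n steps
def pvYs (i : Int) : Nat → List Int
  | 0 => []
  | n + 1 => i :: pvYs (if i = 1 then 0 else 1) n

theorem pvFoldl_inv (row : List Int) (x y : List Int) (i t : Int) (hi : i = 0 ∨ i = 1) :
    row.foldl
      (fun (s : List Int × List Int × Int × Int) p =>
        (s.1 ++ [s.2.2.2 + p], s.2.1 ++ [s.2.2.1],
         (if s.2.2.1 = 1 then 0 else 1), s.2.2.2 + p))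
      (x, y, i, t)
    = (x ++ pvAccum t row, y ++ pvYs i row.length,
       (if (i + row.length) % 2 = 1 then 1 else 0), t + row.sum) := by
  induction row generalizing x y i t with
  | nil =>
    simp [pvAccum, pvYs]
    rcases hi with h | h <;> simp [h]
  | cons p rest ih =>
    simp only [List.foldl_cons]
    rw [ih (x ++ [t + p]) (y ++ [i]) _ (t + p) (by rcases hi with h | h <;> simp [h])]
    simp [pvAccum, pvYs, List.append_assoc]
    constructor
    · rcases hi with h | h <;> subst h <;> split_ifs <;> omega
    · ring

-- B's reverse fold builds the reversed prefix sums (each entry is t minus a suffix sum)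
theorem pvBack_inv (xs : List Int) (acc : List Int) (t : Int) :
    xs.reverse.foldl
      (fun (s : List Int × Int) p => (s.1 ++ [s.2], s.2 - p))
      (acc, t)
    = (acc ++ (pvAccum (t - xs.sum) xs).reverse, t - xs.sum) := by
  induction xs generalizing acc t with
  | nil => simp [pvAccum]
  | cons p rest ih =>
    simp only [List.reverse_cons, List.foldl_append, List.foldl_cons, List.foldl_nil]
    rw [ih acc t]
    simp [pvAccum, List.append_assoc]
    constructor
    · constructor
      · ring_nf
      · ring_nf
    · ring

theorem pvFlatten_replicate (m : Nat) :
    (List.replicate m ([0, 1] : List Int)).flatten = pvYs 0 (2 * m) := by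
  induction m with
  | zero => simp [pvYs]
  | succ m ih =>
    rw [List.replicate_succ, List.flatten_cons, ih]
    have : 2 * (m + 1) = (2 * m) + 1 + 1 := by omega
    rw [this]
    simp [pvYs]

theorem pvTake_pvYs (n : Nat) : ∀ (k : Nat) (i : Int), n ≤ k → (pvYs i k).take n = pvYs i n := by
  induction n with
  | zero => intro k i _; simp [pvYs]
  | succ n ih =>
    intro k i h
    match k, h with
    | k + 1, h =>
      simp only [pvYs, List.take_succ_cons]
      rw [ih k _ (by omega)]

-- ===== VERDICT (by name: the statement is the Claim_ definition above) =====
theorem make_square_signal_spec : Claim_equal_make_square_signal := by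
  intro row _
  unfold Spec_make_square_signal make_square_signal make_square_signal_alt
  rw [pvFoldl_inv row [] [] 0 0 (Or.inl rfl), pvBack_inv row [] row.sum]
  simp only [List.nil_append, sub_self]
  rw [List.reverse_reverse, pvFlatten_replicate, pvTake_pvYs _ _ _ (by omega)]
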